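-- pv_equiv track=rewrite | github.com/melrchen/advent_of_code | 2023/day7.py | get_hand_type_with_wildcards
-- ===== SOURCE A (Python) =====
-- def get_hand_type_with_wildcards(hand):
--     parsed_hand = {}
--     for card in hand:
--         parsed_hand[card] = parsed_hand.get(card, 0)+1
--     lowest_type = parse_hand_type(parsed_hand)
--     if parsed_hand.get('J', 0) > 0:
--         for c in parsed_hand.keys():
--             if c == 'J':
--                 continue
--             new_hand = parsed_hand.copy()
--             new_hand[c] = new_hand.get(c, 0)+new_hand['J']
--             del(new_hand['J'])
--             new_type = parse_hand_type(new_hand)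
--             if new_type < lowest_type:
--                 lowest_type = new_type
--     return lowest_type
--
-- def parse_hand_type(parsed_hand):
--     counts = sorted(parsed_hand.values())
--     # five of a kind
--     if counts==[5]:
--         return 0
--     # four of a kind
--     elif counts==[1, 4]:
--         return 1
--     # full house
--     elif counts==[2, 3]:
--         return 2
--     # three of a kind
--     elif counts==[1, 1, 3]:
--         return 3
--     # two pair
--     elif counts==[1, 2, 2]:
--         return 4
--     # one pair
--     elif counts==[1, 1, 1, 2]:
--         return 5
--     # high number
--     else:
--         return 6
-- ===== SOURCE B (Python) =====
-- def parse_hand_type(parsed_hand):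
--     counts = sorted(parsed_hand.values())
--     if counts == [5]:
--         return 0
--     elif counts == [1, 4]:
--         return 1
--     elif counts == [2, 3]:
--         return 2
--     elif counts == [1, 1, 3]:
--         return 3
--     elif counts == [1, 2, 2]:
--         return 4
--     elif counts == [1, 1, 1, 2]:
--         return 5
--     else:
--         return 6
--
--
-- def get_hand_type_with_wildcards(hand):
--     counts = {}
--     for card in hand:
--         counts[card] = counts.get(card, 0) + 1
--     base = parse_hand_type(counts)
--     j = counts.get('J', 0)
--     if j == 0:
--         return base
--     rest = {c: n for c, n in counts.items() if c != 'J'}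
--     if not rest:
--         return base
--     best = max(rest, key=rest.get)
--     rest[best] = rest[best] + j
--     return parse_hand_type(rest)
-- ===== Notes on version B (the rewrite author's own statement) =====
-- stated objective: simpler
-- what changed: A tries every non-J card as the joker target in a loop and takes the minimum hand type; B assigns all jokers directly to the most frequent non-J card (greedy, provably optimal) and calls parse_hand_type once more, with no candidate loop or min.
import Mathlib
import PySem

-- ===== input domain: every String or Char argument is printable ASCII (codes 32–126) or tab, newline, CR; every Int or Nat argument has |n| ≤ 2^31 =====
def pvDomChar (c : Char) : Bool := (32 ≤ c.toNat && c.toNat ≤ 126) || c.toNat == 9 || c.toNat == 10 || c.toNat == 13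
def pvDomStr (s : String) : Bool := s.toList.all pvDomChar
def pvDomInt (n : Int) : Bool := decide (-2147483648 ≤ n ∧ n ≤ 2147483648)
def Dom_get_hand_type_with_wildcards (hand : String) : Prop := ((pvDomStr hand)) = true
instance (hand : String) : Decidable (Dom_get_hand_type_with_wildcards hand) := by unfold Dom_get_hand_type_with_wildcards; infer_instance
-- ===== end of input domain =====

-- B replaces A's try-every-non-J-card-and-take-the-minimum candidate loop by one greedy step
-- (give all jokers to the most frequent non-J card); objective: simpler.

-- ===== PORT A =====
def parse_hand_type (parsed_hand : PySem.Dict Char Int) : Int :=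
  let counts := PySem.List.sorted parsed_hand.values (fun v => v) false
  if counts = [5] then 0
  else if counts = [1, 4] then 1
  else if counts = [2, 3] then 2
  else if counts = [1, 1, 3] then 3
  else if counts = [1, 2, 2] then 4
  else if counts = [1, 1, 1, 2] then 5
  else 6

def get_hand_type_with_wildcards (hand : String) : Int :=
  let parsed_hand := hand.toList.foldl (fun d card => d.insert card (d.getD card 0 + 1)) PySem.Dict.empty
  let lowest_type := parse_hand_type parsed_hand
  if parsed_hand.getD 'J' 0 > 0 then
    parsed_hand.keys.foldl (fun lowest_type c =>
      if c = 'J' then lowest_type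
      else
        -- new_hand = parsed_hand.copy(); new_hand[c] = new_hand.get(c, 0) + new_hand['J']; del new_hand['J']
        -- (new_hand['J'] read with getD: the key is present, since the guard ensured its count is > 0)
        let new_hand := (parsed_hand.insert c (parsed_hand.getD c 0 + parsed_hand.getD 'J' 0)).erase 'J'
        let new_type := parse_hand_type new_hand
        if new_type < lowest_type then new_type else lowest_type) lowest_type
  else lowest_type

-- ===== PORT B =====
def get_hand_type_with_wildcards_alt (hand : String) : Int :=
  let counts := hand.toList.foldl (fun d card => d.insert card (d.getD card 0 + 1)) PySem.Dict.empty
  let base := parse_hand_type counts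
  let j := counts.getD 'J' 0
  if j = 0 then base
  else
    let rest := counts.items.foldl (fun d p => if p.1 = 'J' then d else d.insert p.1 p.2) PySem.Dict.empty
    if rest.items = [] then base
    else
      match PySem.List.max? rest.keys (fun c => rest.getD c 0) with
      | none => base  -- unreachable: rest is nonempty here (totalisation of Python's max over a nonempty dict)
      | some best => parse_hand_type (rest.insert best (rest.getD best 0 + j))

-- ===== PRECONDITION & SPEC =====
def Spec_get_hand_type_with_wildcards (hand : String) (out : Int) : Prop := out = get_hand_type_with_wildcards_alt hand
instance (hand : String) (out : Int) : Decidable (Spec_get_hand_type_with_wildcards hand out) := by unfold Spec_get_hand_type_with_wildcards; infer_instance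

-- ===== CLAIM (what is proved, stated in full; the proofs are below) =====
def Claim_equal_get_hand_type_with_wildcards : Prop := ∀ (hand : String), Dom_get_hand_type_with_wildcards hand → Spec_get_hand_type_with_wildcards hand (get_hand_type_with_wildcards hand)

-- ===== LEMMAS AND PROOFS =====

-- the hand-type code of a multiset of card counts, given as a plain list of values
def typeOf (l : List Int) : Int :=
  let counts := PySem.List.sorted l (fun v => v) false
  if counts = [5] then 0
  else if counts = [1, 4] then 1
  else if counts = [2, 3] then 2
  else if counts = [1, 1, 3] then 3
  else if counts = [1, 2, 2] then 4
  else if counts = [1, 1, 1, 2] then 5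
  else 6

theorem parse_eq_typeOf (d : PySem.Dict Char Int) : parse_hand_type d = typeOf d.values := rfl

theorem typeOf_perm {l l' : List Int} (h : l.Perm l') : typeOf l = typeOf l' := by
  unfold typeOf
  rw [PySem.List.sorted_eq_sorted_of_perm l l' (fun v => v) (fun a b => id) h]

theorem typeOf_sum_ne_five {l : List Int} (h : l.sum ≠ 5) : typeOf l = 6 := by
  have hperm := PySem.List.sorted_perm l (fun v => v) false
  have hs : (PySem.List.sorted l (fun v => v) false).sum = l.sum := hperm.sum_eq
  simp only [typeOf]
  split_ifs with h1 h2 h3 h4 h5 h6 <;>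
    first
    | rfl
    | (exfalso; apply h; rw [← hs]
       (first | rw [h1] | rw [h2] | rw [h3] | rw [h4] | rw [h5] | rw [h6]) <;> norm_num)

theorem length_le_sum {l : List Int} (h : ∀ v ∈ l, 1 ≤ v) : (l.length : Int) ≤ l.sum := by
  induction l with
  | nil => simp
  | cons a t ih =>
    have := h a (by simp)
    have := ih (fun v hv => h v (by simp [hv]))
    simp only [List.length_cons, List.sum_cons]
    push_cast
    omega

-- greedy optimality: giving the jokers to a maximal count is at least as good as
-- giving them to any other count, and at least as good as leaving them alone
theorem key5 (j : Int) (hj : 1 ≤ j) (ws : List Int) (hpos : ∀ v ∈ ws, 1 ≤ v)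
    (m : Int) (hm : m ∈ ws) (hmax : ∀ v ∈ ws, v ≤ m) :
    (∀ v ∈ ws, typeOf ((m + j) :: ws.erase m) ≤ typeOf ((v + j) :: ws.erase v))
    ∧ typeOf ((m + j) :: ws.erase m) ≤ typeOf (j :: ws) := by
  by_cases hs : j + ws.sum = 5
  case neg =>
    -- every candidate multiset has the same sum j + ws.sum ≠ 5, so every type is 6
    have hcand : ∀ v ∈ ws, typeOf ((v + j) :: ws.erase v) = 6 := by
      intro v hv
      apply typeOf_sum_ne_five
      have : ws.sum = v + (ws.erase v).sum := by
        have := (List.perm_cons_erase hv).sum_eq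
        simpa using this
      simp only [List.sum_cons]
      omega
    constructor
    · intro v hv
      rw [hcand v hv, hcand m hm]
    · rw [hcand m hm]
      have : typeOf (j :: ws) = 6 := by
        apply typeOf_sum_ne_five
        simp only [List.sum_cons]
        omega
      omega
  case pos =>
    have hlen : (ws.length : Int) ≤ ws.sum := length_le_sum hpos
    have hlen4 : ws.length ≤ 4 := by
      by_contra hgt
      have : (5 : Int) ≤ (ws.length : Int) := by exact_mod_cast by omega
      omega
    match ws, hm, hpos, hmax, hs, hlen4 with
    | [a], hm, hpos, hmax, hs, _ =>
      have ha : 1 ≤ a := hpos a (by simp)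
      simp only [List.mem_singleton] at hm
      subst hm
      simp only [List.sum_cons, List.sum_nil] at hs
      have hj4 : j ≤ 4 := by omega
      have hm4 : m ≤ 4 := by omega
      interval_cases j <;> (revert hmax; interval_cases m <;> decide)
    | [a, b], hm, hpos, hmax, hs, _ =>
      have ha : 1 ≤ a := hpos a (by simp)
      have hb : 1 ≤ b := hpos b (by simp)
      simp only [List.mem_cons, List.not_mem_nil, or_false] at hm
      simp only [List.sum_cons, List.sum_nil] at hs
      have hj4 : j ≤ 4 := by omega
      have haU : a ≤ 4 := by omega
      have hbU : b ≤ 4 := by omega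
      interval_cases j <;> interval_cases a <;> interval_cases b <;>
        first
        | omega
        | (rcases hm with rfl | rfl <;> first | omega | (revert hmax; decide))
    | [a, b, c], hm, hpos, hmax, hs, _ =>
      have ha : 1 ≤ a := hpos a (by simp)
      have hb : 1 ≤ b := hpos b (by simp)
      have hc : 1 ≤ c := hpos c (by simp)
      simp only [List.mem_cons, List.not_mem_nil, or_false] at hm
      simp only [List.sum_cons, List.sum_nil] at hs
      have hj4 : j ≤ 4 := by omega
      have haU : a ≤ 4 := by omega
      have hbU : b ≤ 4 := by omega
      have hcU : c ≤ 4 := by omega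
      interval_cases j <;> interval_cases a <;> interval_cases b <;> interval_cases c <;>
        first
        | omega
        | (rcases hm with rfl | rfl | rfl <;> first | omega | (revert hmax; decide))
    | [a, b, c, d], hm, hpos, hmax, hs, _ =>
      have ha : 1 ≤ a := hpos a (by simp)
      have hb : 1 ≤ b := hpos b (by simp)
      have hc : 1 ≤ c := hpos c (by simp)
      have hd : 1 ≤ d := hpos d (by simp)
      simp only [List.mem_cons, List.not_mem_nil, or_false] at hm
      simp only [List.sum_cons, List.sum_nil] at hs
      have hj4 : j ≤ 4 := by omega
      have haU : a ≤ 4 := by omega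
      have hbU : b ≤ 4 := by omega
      have hcU : c ≤ 4 := by omega
      have hdU : d ≤ 4 := by omega
      interval_cases j <;> interval_cases a <;> interval_cases b <;> interval_cases c <;>
        interval_cases d <;>
        first
        | omega
        | (rcases hm with rfl | rfl | rfl | rfl <;> first | omega | (revert hmax; decide))

theorem foldl_min_stays (g : Char → Int) (ks : List Char) (L : Int)
    (h : ∀ c ∈ ks, c ≠ 'J' → L ≤ g c) :
    ks.foldl (fun acc c => if c = 'J' then acc else if g c < acc then g c else acc) L = L := by
  induction ks with
  | nil => rfl
  | cons c t ih =>
    simp only [List.foldl_cons]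
    have step : (if c = 'J' then L else if g c < L then g c else L) = L := by
      by_cases hc : c = 'J'
      · simp [hc]
      · have := h c (by simp) hc
        simp [hc]
        omega
    rw [step]
    exact ih (fun c hc => h c (by simp [hc]))

theorem foldl_min_eq (g : Char → Int) (ks : List Char) (base L : Int)
    (hLb : L ≤ base) (hall : ∀ c ∈ ks, c ≠ 'J' → L ≤ g c)
    (hwit : ∃ c, c ∈ ks ∧ c ≠ 'J' ∧ g c = L) :
    ks.foldl (fun acc c => if c = 'J' then acc else if g c < acc then g c else acc) base = L := by
  induction ks generalizing base with
  | nil => rcases hwit with ⟨c, hc, _⟩; simp at hc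
  | cons c t ih =>
    simp only [List.foldl_cons]
    rcases hwit with ⟨w, hw, hwJ, hwg⟩
    rcases List.mem_cons.mp hw with rfl | hwt
    · -- the witness is the head
      have step : (if w = 'J' then base else if g w < base then g w else base) = L := by
        rw [if_neg hwJ, hwg]
        split_ifs <;> omega
      rw [step]
      exact foldl_min_stays g t L (fun c hc => hall c (by simp [hc]))
    · -- the witness is in the tail
      have hacc : L ≤ (if c = 'J' then base else if g c < base then g c else base) := by
        by_cases hc : c = 'J'
        · simp [hc]; omega
        · have := hall c (by simp) hc
          simp [hc]
          omega
      exact ih _ hacc (fun c hc => hall c (by simp [hc])) ⟨w, hwt, hwJ, hwg⟩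

theorem map_erase_perm (f : Char → Int) {ks : List Char} {c : Char} (hc : c ∈ ks) :
    ((ks.map f).erase (f c)).Perm ((ks.erase c).map f) := by
  have h1 : ks.Perm (c :: ks.erase c) := List.perm_cons_erase hc
  have h2 : (ks.map f).Perm (f c :: (ks.erase c).map f) := by simpa using h1.map f
  have h3 := h2.erase (f c)
  simpa using h3

theorem erase_items (e : PySem.Dict Char Int) (k : Char) :
    (e.erase k).items = e.items.filter (fun p => !(p.1 == k)) := rfl

theorem values_eraseJ (e : PySem.Dict Char Int) (hnd : e.keys.Nodup) :
    (e.erase 'J').values = (e.keys.filter (fun k => !(k == 'J'))).map (fun k => e.getD k 0) := by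
  have hitems : (e.erase 'J').items
      = (e.keys.filter (fun k => !(k == 'J'))).map (fun k => (k, e.getD k 0)) := by
    calc (e.erase 'J').items
        = e.items.filter (fun p => !(p.1 == 'J')) := erase_items e 'J'
      _ = ((e.keys.map (fun k => (k, e.getD k 0))).filter (fun p => !(p.1 == 'J'))) := by
            rw [← PySem.Dict.items_eq_map_keys e hnd 0]
      _ = (e.keys.filter (((fun p : Char × Int => !(p.1 == 'J')) ∘ (fun k => (k, e.getD k 0))))).map
            (fun k => (k, e.getD k 0)) :=
            List.filter_map (l := e.keys) (f := fun k => (k, e.getD k 0))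
              (p := fun p => !(p.1 == 'J'))
      _ = (e.keys.filter (fun k => !(k == 'J'))).map (fun k => (k, e.getD k 0)) := rfl
  show (e.erase 'J').items.map (fun p => p.2) = _
  rw [hitems, List.map_map]
  rfl

theorem bumpA (d : PySem.Dict Char Int) (hnd : d.keys.Nodup) {c : Char}
    (hck : c ∈ d.keys) (hcJ : c ≠ 'J') (w : Int) :
    (((d.insert c w).erase 'J').values).Perm
      (w :: ((d.keys.filter (fun k => !(k == 'J'))).erase c).map (fun k => d.getD k 0)) := by
  have hcon : d.contains c = true := (PySem.Dict.contains_iff_mem_keys d c).mpr hck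
  have hkeys2 : (d.insert c w).keys = d.keys := PySem.Dict.keys_insert_of_contains d w hcon
  have hnd2 : (d.insert c w).keys.Nodup := by rw [hkeys2]; exact hnd
  have hv := values_eraseJ (d.insert c w) hnd2
  rw [hv, hkeys2]
  have hcks' : c ∈ d.keys.filter (fun k => !(k == 'J')) :=
    List.mem_filter.mpr ⟨hck, by simp [hcJ]⟩
  have hnd' : (d.keys.filter (fun k => !(k == 'J'))).Nodup := hnd.filter _
  have h2 := (List.perm_cons_erase hcks').map (fun k => (d.insert c w).getD k 0)
  have hhead : (d.insert c w).getD c 0 = w := by simp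
  have htail : ((d.keys.filter (fun k => !(k == 'J'))).erase c).map
        (fun k => (d.insert c w).getD k 0)
      = ((d.keys.filter (fun k => !(k == 'J'))).erase c).map (fun k => d.getD k 0) := by
    apply List.map_congr_left
    intro k hk
    have hkc : k ≠ c := by
      rintro rfl
      exact hnd'.not_mem_erase hk
    rw [PySem.Dict.getD_insert]
    simp [hkc]
  rw [List.map_cons, hhead, htail] at h2
  exact h2

theorem bumpB (e : PySem.Dict Char Int) (hnd : e.keys.Nodup) {c : Char}
    (hc : c ∈ e.keys) (w : Int) :
    ((e.insert c w).values).Perm (w :: (e.keys.erase c).map (fun k => e.getD k 0)) := by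
  have hcon : e.contains c = true := (PySem.Dict.contains_iff_mem_keys e c).mpr hc
  have hkeys2 : (e.insert c w).keys = e.keys := PySem.Dict.keys_insert_of_contains e w hcon
  have hnd2 : (e.insert c w).keys.Nodup := by rw [hkeys2]; exact hnd
  have hv := PySem.Dict.values_eq_map_keys (e.insert c w) hnd2 0
  rw [hkeys2] at hv
  rw [hv]
  have h2 := (List.perm_cons_erase hc).map (fun k => (e.insert c w).getD k 0)
  have hhead : (e.insert c w).getD c 0 = w := by simp
  have htail : (e.keys.erase c).map (fun k => (e.insert c w).getD k 0)
      = (e.keys.erase c).map (fun k => e.getD k 0) := by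
    apply List.map_congr_left
    intro k hk
    have hkc : k ≠ c := by
      rintro rfl
      exact hnd.not_mem_erase hk
    rw [PySem.Dict.getD_insert]
    simp [hkc]
  rw [List.map_cons, hhead, htail] at h2
  exact h2

theorem main_eq (hand : String) :
    get_hand_type_with_wildcards hand = get_hand_type_with_wildcards_alt hand := by
  simp only [get_hand_type_with_wildcards, get_hand_type_with_wildcards_alt,
    PySem.Dict.foldl_insert_getD_add_one_eq_counter]
  set xs := hand.toList with hxs
  set d := PySem.Dict.counter xs with hd
  have hnd : d.keys.Nodup := PySem.Dict.nodup_keys_counter xs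
  have hget : ∀ k, d.getD k 0 = (xs.count k : Int) := fun k => PySem.Dict.getD_counter xs k
  have hmemkeys : ∀ k, k ∈ d.keys ↔ k ∈ xs := by
    intro k
    rw [hd, PySem.Dict.keys_counter, PySem.Set.mem_ofList]
  by_cases hJ : xs.count 'J' = 0
  · have h0 : d.getD 'J' 0 = 0 := by rw [hget, hJ]; rfl
    simp [h0]
  · have hjpos : 0 < xs.count 'J' := Nat.pos_of_ne_zero hJ
    have hj1 : (1 : Int) ≤ d.getD 'J' 0 := by rw [hget]; exact_mod_cast hjpos
    have hgt : d.getD 'J' 0 > 0 := by omega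
    have hne0 : ¬ (d.getD 'J' 0 = 0) := by omega
    rw [if_pos hgt, if_neg hne0]
    -- rewrite B's dict comprehension as a fold over the filtered items
    have hrest_fun : (fun (dd : PySem.Dict Char Int) (p : Char × Int) =>
          if p.1 = 'J' then dd else dd.insert p.1 p.2)
        = (fun dd p => if (!(p.1 == 'J')) = true then dd.insert p.1 p.2 else dd) := by
      funext dd p
      by_cases h : p.1 = 'J' <;> simp [h]
    rw [hrest_fun, ← List.foldl_filter]
    set l := d.items.filter (fun p => !(p.1 == 'J')) with hl
    set rest := l.foldl (fun (dd : PySem.Dict Char Int) p => dd.insert p.1 p.2) PySem.Dict.empty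
      with hrest
    set ks' := d.keys.filter (fun k => !(k == 'J')) with hks'
    have hlks : l = ks'.map (fun k => (k, d.getD k 0)) := by
      calc l = (d.keys.map (fun k => (k, d.getD k 0))).filter (fun p => !(p.1 == 'J')) := by
              rw [hl, ← PySem.Dict.items_eq_map_keys d hnd 0]
        _ = (d.keys.filter (((fun p : Char × Int => !(p.1 == 'J')) ∘
              (fun k => (k, d.getD k 0))))).map (fun k => (k, d.getD k 0)) :=
              List.filter_map (l := d.keys) (f := fun k => (k, d.getD k 0))
                (p := fun p => !(p.1 == 'J'))
        _ = ks'.map (fun k => (k, d.getD k 0)) := rfl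
    have hmapfst : l.map Prod.fst = ks' := by
      rw [hlks, List.map_map]
      simp [Function.comp_def]
    have hfresh := PySem.Dict.items_foldl_insert_fresh l Prod.fst Prod.snd PySem.Dict.empty
      (by intro a _; simp [PySem.Dict.contains_empty]) (by rw [hmapfst]; exact hnd.filter _)
    have hrestitems : rest.items = l := by
      rw [hrest, hfresh]
      simp [PySem.Dict.empty]
    have hrkeys : rest.keys = ks' := by
      show rest.items.map (fun p => p.1) = ks'
      rw [hrestitems, hlks, List.map_map]
      simp [Function.comp_def]
    have hrnd : rest.keys.Nodup := by rw [hrkeys]; exact hnd.filter _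
    have hrget : ∀ k ∈ ks', rest.getD k 0 = d.getD k 0 := by
      intro k hk
      apply PySem.Dict.getD_of_mem_items
      · rw [hrestitems, hlks]
        exact List.mem_map_of_mem hk
      · exact hrnd
    by_cases hre : rest.items = []
    · -- all cards are jokers: A's loop skips everything, B keeps the baseline
      rw [if_pos hre]
      have hks'nil : ks' = [] := by
        rw [hrestitems, hlks] at hre
        exact List.map_eq_nil_iff.mp hre
      apply foldl_min_stays
      intro c hc hcJ
      exfalso
      have : c ∈ ks' := List.mem_filter.mpr ⟨hc, by simp [hcJ]⟩
      rw [hks'nil] at this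
      simp at this
    · rw [if_neg hre]
      have hks'ne : ks' ≠ [] := by
        intro h0
        apply hre
        rw [hrestitems, hlks, h0]
        rfl
      cases hbm : PySem.List.max? rest.keys (fun c => rest.getD c 0) with
      | none =>
        exfalso
        apply hks'ne
        rw [← hrkeys]
        exact (PySem.List.max?_eq_none_iff _ _).mp hbm
      | some best =>
        have hbestks : best ∈ ks' := by rw [← hrkeys]; exact PySem.List.max?_mem hbm
        have hbestkeys : best ∈ d.keys := (List.mem_filter.mp hbestks).1
        have hbestJ : best ≠ 'J' := by
          have := (List.mem_filter.mp hbestks).2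
          simpa using this
        have hbmax := PySem.List.max?_isMax hbm
        have hpos : ∀ v ∈ ks'.map (fun k => d.getD k 0), 1 ≤ v := by
          intro v hv
          obtain ⟨k, hk, rfl⟩ := List.mem_map.mp hv
          have hkx : k ∈ xs := (hmemkeys k).mp (List.mem_filter.mp hk).1
          rw [hget]
          exact_mod_cast List.count_pos_iff.mpr hkx
        have hmem : d.getD best 0 ∈ ks'.map (fun k => d.getD k 0) :=
          List.mem_map_of_mem hbestks
        have hmax' : ∀ v ∈ ks'.map (fun k => d.getD k 0), v ≤ d.getD best 0 := by
          intro v hv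
          obtain ⟨k, hk, rfl⟩ := List.mem_map.mp hv
          have := hbmax k (by rw [hrkeys]; exact hk)
          rwa [hrget k hk, hrget best hbestks] at this
        obtain ⟨K1, K2⟩ := key5 (d.getD 'J' 0) hj1 (ks'.map (fun k => d.getD k 0)) hpos
          (d.getD best 0) hmem hmax'
        have hJkeys : 'J' ∈ d.keys := (hmemkeys 'J').mpr (List.count_pos_iff.mp hjpos)
        -- the baseline value
        have hbase : parse_hand_type d
            = typeOf (d.getD 'J' 0 :: ks'.map (fun k => d.getD k 0)) := by
          rw [parse_eq_typeOf]
          apply typeOf_perm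
          have hv := PySem.Dict.values_eq_map_keys d hnd 0
          have herase : d.keys.erase 'J' = ks' := by
            rw [hnd.erase_eq_filter, hks']
            rfl
          have h2 := (List.perm_cons_erase hJkeys).map (fun k => d.getD k 0)
          rw [List.map_cons, herase] at h2
          rw [hv]
          exact h2
        -- each of A's candidates, written at the level of count multisets
        have hg : ∀ c ∈ d.keys, c ≠ 'J' →
            parse_hand_type ((d.insert c (d.getD c 0 + d.getD 'J' 0)).erase 'J')
            = typeOf ((d.getD c 0 + d.getD 'J' 0)
                :: (ks'.map (fun k => d.getD k 0)).erase (d.getD c 0)) := by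
          intro c hc hcJ
          rw [parse_eq_typeOf]
          apply typeOf_perm
          have hcks' : c ∈ ks' := List.mem_filter.mpr ⟨hc, by simp [hcJ]⟩
          have h1 := bumpA d hnd hc hcJ (d.getD c 0 + d.getD 'J' 0)
          rw [← hks'] at h1
          have h2 := map_erase_perm (fun k => d.getD k 0) hcks'
          exact h1.trans ((h2.symm).cons _)
        -- B's value
        have hB : parse_hand_type (rest.insert best (rest.getD best 0 + d.getD 'J' 0))
            = typeOf ((d.getD best 0 + d.getD 'J' 0)
                :: (ks'.map (fun k => d.getD k 0)).erase (d.getD best 0)) := by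
          rw [parse_eq_typeOf]
          apply typeOf_perm
          have h1 := bumpB rest hrnd (c := best) (by rw [hrkeys]; exact hbestks)
            (rest.getD best 0 + d.getD 'J' 0)
          rw [hrkeys] at h1
          have htail : (ks'.erase best).map (fun k => rest.getD k 0)
              = (ks'.erase best).map (fun k => d.getD k 0) := by
            apply List.map_congr_left
            intro k hk
            exact hrget k (List.mem_of_mem_erase hk)
          rw [htail] at h1
          have h2 := map_erase_perm (fun k => d.getD k 0) hbestks
          refine h1.trans ?_
          rw [hrget best hbestks]
          exact (h2.symm).cons _
        show _ = parse_hand_type (rest.insert best (rest.getD best 0 + d.getD 'J' 0))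
        rw [hB]
        apply foldl_min_eq
        · rw [hbase]
          exact K2
        · intro c hc hcJ
          rw [hg c hc hcJ]
          have : c ∈ ks' := List.mem_filter.mpr ⟨hc, by simp [hcJ]⟩
          exact K1 (d.getD c 0) (List.mem_map_of_mem this)
        · exact ⟨best, hbestkeys, hbestJ, hg best hbestkeys hbestJ⟩

-- ===== VERDICT (by name: the statement is the Claim_ definition above) =====
theorem get_hand_type_with_wildcards_spec : Claim_equal_get_hand_type_with_wildcards := by
  intro hand _
  unfold Spec_get_hand_type_with_wildcards
  exact main_eq hand
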